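-- pv_equiv track=rewrite | github.com/xavierdong/Bazean-Case-Study-2018 | case study.py | find_relevant_headers
-- ===== SOURCE A (Python) =====
-- def find_relevant_headers(all_headers, key_words):
--     """
--     :param all_header: list of all header from csv data
--            key_words = list of key_words used to select relevant column
--     :return: rel_headers_index: list of index of relevant headers
--              rel_headers: list name of relevant headers
--     """
--     rel_headers = []
--     for header in all_headers:
--         for key in key_words:
--             if key.lower() in header.lower():
--                 rel_headers.append(header)
--
--     # removes duplicate header from header list while preserving order
--     seen = {}
--     rel_headers = [seen.setdefault(x, x) for x in rel_headers if x not in seen]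
--
--     # grabs index
--     rel_headers_index = [i for i, item in enumerate(all_headers) if item in rel_headers]
--     return rel_headers_index, rel_headers
-- ===== SOURCE B (Python) =====
-- def find_relevant_headers(all_headers, key_words):
--     """
--     :param all_header: list of all header from csv data
--            key_words = list of key_words used to select relevant column
--     :return: rel_headers_index: list of index of relevant headers
--              rel_headers: list name of relevant headers
--     """
--     seen = set()
--     rel_headers_index = []
--     rel_headers = []
--     for i, header in enumerate(all_headers):
--         if any(key.lower() in header.lower() for key in key_words):
--             rel_headers_index.append(i)
--             if header not in seen:
--                 seen.add(header)
--                 rel_headers.append(header)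
--     return rel_headers_index, rel_headers
-- ===== Notes on version B (the rewrite author's own statement) =====
-- stated objective: faster
-- what changed: A's three passes (nested match-collect loop, dict-based dedup comprehension, and an index pass that rescans the dedup'd list with 'item in rel_headers') are fused into one pass over enumerate(all_headers) with a seen set, so the per-header list rescan disappears.
import Mathlib
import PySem

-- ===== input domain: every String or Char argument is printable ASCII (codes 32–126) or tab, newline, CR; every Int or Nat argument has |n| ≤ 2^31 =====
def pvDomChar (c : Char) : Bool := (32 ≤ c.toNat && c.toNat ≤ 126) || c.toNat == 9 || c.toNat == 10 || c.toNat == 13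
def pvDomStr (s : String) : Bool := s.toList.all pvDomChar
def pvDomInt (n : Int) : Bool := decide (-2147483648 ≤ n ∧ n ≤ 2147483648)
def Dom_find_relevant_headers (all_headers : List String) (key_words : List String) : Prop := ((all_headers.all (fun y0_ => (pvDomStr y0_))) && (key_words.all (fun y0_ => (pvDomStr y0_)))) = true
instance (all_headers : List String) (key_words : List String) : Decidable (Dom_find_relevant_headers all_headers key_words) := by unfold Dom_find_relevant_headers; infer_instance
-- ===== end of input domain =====

-- B fuses A's three passes (match-collect, dict-based dedup, index rescan) into one pass
-- over enumerate(all_headers) with a `seen` set; same return value, the list rescan disappears.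

-- ===== PORT A =====
-- the body of A's dedup list comprehension: 'x not in seen' guard, then 'seen.setdefault(x, x)'
def pvStepA (p : PySem.Dict String String × List String) (x : String) :
    PySem.Dict String String × List String :=
  if p.1.contains x then p
  else
    let seen' := p.1.setdefault x x
    (seen', p.2 ++ [seen'.getD x x])

def find_relevant_headers (all_headers : List String) (key_words : List String) : List Int × List String :=
  -- pass 1: for header in all_headers: for key in key_words: if key.lower() in header.lower(): append
  let rel0 : List String := all_headers.foldl (fun acc header =>
    key_words.foldl (fun acc2 key =>
      if PySem.Str.isIn (PySem.Str.lower key) (PySem.Str.lower header) then acc2 ++ [header]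
      else acc2) acc) []
  -- pass 2: seen = {}; rel = [seen.setdefault(x, x) for x in rel0 if x not in seen]
  let rel := (rel0.foldl pvStepA (PySem.Dict.empty, [])).2
  -- pass 3: [i for i, item in enumerate(all_headers) if item in rel]
  let idxs : List Int := ((PySem.List.enumerate all_headers 0).filter
      (fun p => rel.contains p.2)).map (fun p => p.1)
  (idxs, rel)

-- ===== PORT B =====
-- the body of B's single loop over enumerate(all_headers)
def pvStepB (key_words : List String) (st : PySem.Set String × List Int × List String)
    (p : Int × String) : PySem.Set String × List Int × List String :=
  if key_words.any (fun key => PySem.Str.isIn (PySem.Str.lower key) (PySem.Str.lower p.2)) then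
    if PySem.Set.contains st.1 p.2 then (st.1, st.2.1 ++ [p.1], st.2.2)
    else (PySem.Set.add st.1 p.2, st.2.1 ++ [p.1], st.2.2 ++ [p.2])
  else st

def find_relevant_headers_alt (all_headers : List String) (key_words : List String) : List Int × List String :=
  let st := (PySem.List.enumerate all_headers 0).foldl (pvStepB key_words)
    (PySem.Set.empty, [], [])
  (st.2.1, st.2.2)

-- ===== PRECONDITION & SPEC =====
def Spec_find_relevant_headers (all_headers : List String) (key_words : List String) (out : List Int × List String) : Prop := out = find_relevant_headers_alt all_headers key_words
instance (all_headers : List String) (key_words : List String) (out : List Int × List String) : Decidable (Spec_find_relevant_headers all_headers key_words out) := by unfold Spec_find_relevant_headers; infer_instance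

-- ===== CLAIM (what is proved, stated in full; the proofs are below) =====
def Claim_equal_find_relevant_headers : Prop := ∀ (all_headers : List String) (key_words : List String), Dom_find_relevant_headers all_headers key_words → Spec_find_relevant_headers all_headers key_words (find_relevant_headers all_headers key_words)

-- ===== LEMMAS AND PROOFS =====

-- the shared match test: "some keyword (lower-cased) occurs in header.lower()"
def pvMatch (key_words : List String) (h : String) : Bool :=
  key_words.any (fun key => PySem.Str.isIn (PySem.Str.lower key) (PySem.Str.lower h))

-- order-preserving first-occurrence dedup relative to an already-seen list
def pvDd (seen : List String) : List String → List String
  | [] => []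
  | x :: t => if x ∈ seen then pvDd seen t else x :: pvDd (seen ++ [x]) t

theorem pvMatch_false_iff (kws : List String) (h : String) :
    pvMatch kws h = false ↔
      kws.filter (fun key => PySem.Str.isIn (PySem.Str.lower key) (PySem.Str.lower h)) = [] := by
  simp [pvMatch, List.filter_eq_nil_iff, List.any_eq_false]

theorem pvDd_rep_absorb (m : Nat) (seen : List String) (h : String) (l : List String)
    (hm : h ∈ seen) : pvDd seen (List.replicate m h ++ l) = pvDd seen l := by
  induction m with
  | zero => simp
  | succ m ih => simp [List.replicate_succ, pvDd, hm, ih]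

theorem pvDd_flatMap (kws : List String) (hs : List String) : ∀ seen : List String,
    pvDd seen (hs.flatMap (fun h =>
      (kws.filter (fun key => PySem.Str.isIn (PySem.Str.lower key) (PySem.Str.lower h))).map
        (fun _ => h)))
    = pvDd seen (hs.filter (pvMatch kws)) := by
  induction hs with
  | nil => intro seen; rfl
  | cons h t ih =>
    intro seen
    rw [List.flatMap_cons, List.filter_cons]
    by_cases hm : pvMatch kws h = true
    · rw [if_pos (by simp [hm]), List.map_const']
      cases hn : (kws.filter (fun key => PySem.Str.isIn (PySem.Str.lower key) (PySem.Str.lower h))).length with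
      | zero =>
        exact absurd ((pvMatch_false_iff kws h).mpr (List.length_eq_zero_iff.mp hn)) (by simp [hm])
      | succ m =>
        rw [List.replicate_succ, List.cons_append]
        by_cases hseen : h ∈ seen
        · rw [pvDd, if_pos hseen, pvDd, if_pos hseen,
            pvDd_rep_absorb m seen h _ hseen, ih seen]
        · rw [pvDd, if_neg hseen, pvDd, if_neg hseen,
            pvDd_rep_absorb m (seen ++ [h]) h _ (by simp), ih (seen ++ [h])]
    · have hm0 : pvMatch kws h = false := by simpa using hm
      rw [(pvMatch_false_iff kws h).mp hm0, if_neg (by simp [hm0])]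
      simpa using ih seen

theorem pvMem_pvDd (x : String) : ∀ (l seen : List String),
    x ∈ pvDd seen l ↔ x ∈ l ∧ x ∉ seen := by
  intro l
  induction l with
  | nil => simp [pvDd]
  | cons y t ih =>
    intro seen
    by_cases hy : y ∈ seen
    · rw [pvDd, if_pos hy, ih]
      constructor
      · rintro ⟨h1, h2⟩; exact ⟨List.mem_cons_of_mem _ h1, h2⟩
      · rintro ⟨h1, h2⟩
        rcases List.mem_cons.mp h1 with rfl | hmem
        · exact absurd hy h2
        · exact ⟨hmem, h2⟩
    · rw [pvDd, if_neg hy]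
      simp only [List.mem_cons, ih, List.mem_append]
      constructor
      · rintro (rfl | ⟨h1, h2⟩)
        · exact ⟨Or.inl rfl, hy⟩
        · exact ⟨Or.inr h1, fun hx => h2 (Or.inl hx)⟩
      · rintro ⟨rfl | h1, h2⟩
        · exact Or.inl rfl
        · by_cases hxy : x = y
          · exact Or.inl hxy
          · refine Or.inr ⟨h1, fun hx => ?_⟩
            rcases hx with hx | hx
            · exact h2 hx
            · simp at hx; exact hxy hx

-- A's dict-based dedup fold produces pvDd of the dict's keys
theorem foldA_dedup (xs : List String) : ∀ (d : PySem.Dict String String) (out : List String),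
    (xs.foldl pvStepA (d, out)).2 = out ++ pvDd d.keys xs := by
  induction xs with
  | nil => intro d out; simp [pvDd]
  | cons x t ih =>
    intro d out
    by_cases hc : d.contains x = true
    · have hk : x ∈ d.keys := (PySem.Dict.contains_iff_mem_keys d x).mp hc
      have e : pvStepA (d, out) x = (d, out) := by simp [pvStepA, hc]
      rw [List.foldl_cons, e, ih d out, pvDd, if_pos hk]
    · have hc' : d.contains x = false := by simpa using hc
      have hk : x ∉ d.keys := fun h => by
        simp [(PySem.Dict.contains_iff_mem_keys d x).mpr h] at hc'
      have e : pvStepA (d, out) x = (d.insert x x, out ++ [x]) := by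
        simp [pvStepA, hc', PySem.Dict.setdefault_of_not_contains d x hc']
      rw [List.foldl_cons, e, ih (d.insert x x) (out ++ [x]), pvDd, if_neg hk,
        PySem.Dict.keys_insert_of_not_contains d x hc']
      simp

-- B's single fold, characterised
theorem foldB_char (kws : List String) (hs : List String) :
    ∀ (s : Int) (seen : PySem.Set String) (idxs : List Int) (names : List String),
    (PySem.List.enumerate hs s).foldl (pvStepB kws) (seen, idxs, names)
    = ((hs.filter (pvMatch kws)).foldl PySem.Set.add seen,
       idxs ++ ((PySem.List.enumerate hs s).filter (fun p => pvMatch kws p.2)).map (fun p => p.1),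
       names ++ pvDd seen (hs.filter (pvMatch kws))) := by
  induction hs with
  | nil => intro s seen idxs names; simp [PySem.List.enumerate, pvDd]
  | cons h t ih =>
    intro s seen idxs names
    rw [PySem.List.enumerate_cons, List.filter_cons, List.filter_cons]
    by_cases hm : pvMatch kws h = true
    · have hm' : (kws.any fun key => PySem.Str.isIn (PySem.Str.lower key) (PySem.Str.lower h)) = true := hm
      rw [if_pos hm, if_pos hm]
      cases hseen : PySem.Set.contains seen h with
      | true =>
        have hmem : h ∈ seen := (PySem.Set.contains_iff seen h).mp hseen
        have e : pvStepB kws (seen, idxs, names) (s, h) = (seen, idxs ++ [s], names) := by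
          simp only [pvStepB]; rw [if_pos hm', if_pos hseen]
        have eadd : PySem.Set.add seen h = seen := by
          unfold PySem.Set.add; rw [if_pos hseen]
        rw [List.foldl_cons, e, ih (s + 1) seen (idxs ++ [s]) names,
          List.foldl_cons, eadd, pvDd, if_pos hmem]
        simp
      | false =>
        have hnot : ¬ PySem.Set.contains seen h = true := fun hx => by
          rw [hseen] at hx; exact Bool.false_ne_true hx
        have hmem : h ∉ seen := fun hx => hnot ((PySem.Set.contains_iff seen h).mpr hx)
        have hadd : PySem.Set.add seen h = seen ++ [h] := by
          unfold PySem.Set.add; rw [if_neg hnot]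
        have e : pvStepB kws (seen, idxs, names) (s, h)
            = (PySem.Set.add seen h, idxs ++ [s], names ++ [h]) := by
          simp only [pvStepB]; rw [if_pos hm', if_neg hnot]
        rw [List.foldl_cons, e, ih (s + 1) (PySem.Set.add seen h) (idxs ++ [s]) (names ++ [h]),
          List.foldl_cons, pvDd, if_neg hmem, hadd]
        simp
    · have hm0 : pvMatch kws h = false := by simpa using hm
      have hm0' : (kws.any fun key => PySem.Str.isIn (PySem.Str.lower key) (PySem.Str.lower h)) = false := hm0
      have hnotm : ¬ (kws.any fun key => PySem.Str.isIn (PySem.Str.lower key) (PySem.Str.lower h)) = true :=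
        fun hx => by rw [hm0'] at hx; exact Bool.false_ne_true hx
      have e : pvStepB kws (seen, idxs, names) (s, h) = (seen, idxs, names) := by
        simp only [pvStepB]; rw [if_neg hnotm]
      rw [List.foldl_cons, e, ih (s + 1) seen idxs names]
      simp [hm0]

-- ===== VERDICT (by name: the statement is the Claim_ definition above) =====
theorem find_relevant_headers_spec : Claim_equal_find_relevant_headers := by
  intro hs kws _
  show find_relevant_headers hs kws = find_relevant_headers_alt hs kws
  -- rewrite A's pass 1 to a flatMap of per-header blocks
  have h1 : hs.foldl (fun acc header =>
      kws.foldl (fun acc2 key =>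
        if PySem.Str.isIn (PySem.Str.lower key) (PySem.Str.lower header) then acc2 ++ [header]
        else acc2) acc) []
      = hs.flatMap (fun h =>
          (kws.filter (fun key => PySem.Str.isIn (PySem.Str.lower key) (PySem.Str.lower h))).map
            (fun _ => h)) := by
    have hfun : (fun (acc : List String) (header : String) =>
        kws.foldl (fun acc2 key =>
          if PySem.Str.isIn (PySem.Str.lower key) (PySem.Str.lower header) then acc2 ++ [header]
          else acc2) acc)
        = (fun acc header => acc ++
            (kws.filter (fun key => PySem.Str.isIn (PySem.Str.lower key) (PySem.Str.lower header))).map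
              (fun _ => header)) := by
      funext acc header
      exact PySem.List.foldl_append_if _ _ kws acc
    rw [hfun, PySem.List.foldl_append_eq_flatMap]
    simp
  have hdd : pvDd (PySem.Dict.empty : PySem.Dict String String).keys (hs.flatMap (fun h =>
      (kws.filter (fun key => PySem.Str.isIn (PySem.Str.lower key) (PySem.Str.lower h))).map
        (fun _ => h))) = pvDd [] (hs.filter (pvMatch kws)) := by
    rw [PySem.Dict.keys_empty]; exact pvDd_flatMap kws hs ([])
  -- index lists agree: membership in the dedup'd list equals the match test on elements of hs
  have hidx : ((PySem.List.enumerate hs 0).filter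
      (fun p => (pvDd ([] : List String) (hs.filter (pvMatch kws))).contains p.2)).map (fun p => p.1)
      = ((PySem.List.enumerate hs 0).filter (fun p => pvMatch kws p.2)).map (fun p => p.1) := by
    congr 1
    apply List.filter_congr
    intro p hp
    rcases (PySem.List.mem_enumerate_iff hs 0 p).mp hp with ⟨k, hk, rfl⟩
    have hmemhs : hs[k] ∈ hs := List.getElem_mem hk
    by_cases hm : pvMatch kws (hs[k]) = true
    · have hin : hs[k] ∈ pvDd ([] : List String) (hs.filter (pvMatch kws)) :=
        (pvMem_pvDd _ _ _).mpr ⟨List.mem_filter.mpr ⟨hmemhs, hm⟩, by simp⟩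
      simp only [hm, List.contains_iff_mem]  -- reduce both sides
      simpa using hin
    · have hm' : pvMatch kws (hs[k]) = false := by simpa using hm
      have hnot : hs[k] ∉ pvDd ([] : List String) (hs.filter (pvMatch kws)) := by
        intro hx
        rcases (pvMem_pvDd _ _ _).mp hx with ⟨hfl, _⟩
        exact hm (List.mem_filter.mp hfl).2
      simp only [hm']
      simpa using hnot
  show (_, _) = find_relevant_headers_alt hs kws
  rw [find_relevant_headers_alt]
  simp only [h1, foldA_dedup, foldB_char, hdd, hidx, List.nil_append]
  rfl
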